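-- pv_equiv track=rewrite | github.com/eole-nlp/eole | eole/tests/test_chunk_attn_mask.py | _prefix_chunked_allowed_keys
-- ===== SOURCE A (Python) =====
-- def _prefix_chunked_allowed_keys(q_pos, cache_len, current_step, chunk_size, prefix_len, sliding_window=0):
--     """Pure-Python reference for _chunk_attn_mask with prefix-LM semantics.
--
--     A key position is allowed when:
--     - (causal rule) k <= q, AND the sliding-window constraint holds, OR
--     - (prefix rule) BOTH q < prefix_len AND k < prefix_len AND k < current_step+chunk_size
--       (the third condition prevents attending to unfilled cache slots).
--     """
--     filled_end = current_step + chunk_size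
--     causal_keys = {k for k in range(cache_len) if k <= q_pos}
--     if sliding_window > 0:
--         causal_keys = {k for k in causal_keys if k >= q_pos - sliding_window + 1}
--
--     if q_pos < prefix_len:
--         prefix_keys = {k for k in range(cache_len) if k < prefix_len and k < filled_end}
--         return causal_keys | prefix_keys
--     return causal_keys
-- ===== SOURCE B (Python) =====
-- def _prefix_chunked_allowed_keys(q_pos, cache_len, current_step, chunk_size, prefix_len, sliding_window=0):
--     """Interval arithmetic: derive the allowed keys as contiguous ranges instead of
--     filtering every index in range(cache_len)."""
--     causal_lo = max(0, q_pos - sliding_window + 1) if sliding_window > 0 else 0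
--     causal_hi = min(q_pos + 1, cache_len)
--     causal_keys = set(range(causal_lo, causal_hi))
--     if q_pos < prefix_len:
--         prefix_end = min(prefix_len, min(current_step + chunk_size, cache_len))
--         return causal_keys | set(range(0, prefix_end))
--     return causal_keys
-- ===== Notes on version B (the rewrite author's own statement) =====
-- stated objective: simpler
-- what changed: B computes the allowed keys as contiguous integer intervals whose endpoints are derived arithmetically (max/min of the bounds) and built with set(range(lo,hi)) rather than scanning every index in range(cache_len) with per-element predicates.
import Mathlib
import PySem

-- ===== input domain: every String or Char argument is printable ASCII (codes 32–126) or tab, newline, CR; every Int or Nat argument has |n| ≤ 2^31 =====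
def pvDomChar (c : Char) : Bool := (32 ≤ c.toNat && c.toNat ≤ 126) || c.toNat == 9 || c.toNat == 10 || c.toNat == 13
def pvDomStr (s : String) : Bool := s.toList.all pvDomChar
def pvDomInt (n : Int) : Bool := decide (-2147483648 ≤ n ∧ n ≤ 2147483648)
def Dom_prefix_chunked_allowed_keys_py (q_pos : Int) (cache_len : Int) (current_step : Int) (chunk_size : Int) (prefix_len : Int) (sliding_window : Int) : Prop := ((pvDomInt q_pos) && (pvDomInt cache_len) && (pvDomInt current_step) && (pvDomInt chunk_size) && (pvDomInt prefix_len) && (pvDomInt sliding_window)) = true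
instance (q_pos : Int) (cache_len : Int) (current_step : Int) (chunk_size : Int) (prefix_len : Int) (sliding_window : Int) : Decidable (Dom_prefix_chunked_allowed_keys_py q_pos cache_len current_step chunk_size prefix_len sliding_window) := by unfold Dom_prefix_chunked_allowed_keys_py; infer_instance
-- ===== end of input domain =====

-- ===== PORT A =====
-- B derives the allowed keys as contiguous integer intervals instead of filtering every
-- index of range(cache_len); objective: simpler.
def prefix_chunked_allowed_keys_py (q_pos : Int) (cache_len : Int) (current_step : Int) (chunk_size : Int) (prefix_len : Int) (sliding_window : Int) : List Int :=
  let filled_end := current_step + chunk_size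
  let causal_keys : PySem.Set Int :=
    PySem.Set.ofList ((PySem.List.pyRange 0 cache_len 1).filter (fun k => decide (k ≤ q_pos)))
  let causal_keys : PySem.Set Int :=
    if sliding_window > 0 then
      PySem.Set.ofList (causal_keys.filter (fun k => decide (q_pos - sliding_window + 1 ≤ k)))
    else causal_keys
  if q_pos < prefix_len then
    let prefix_keys : PySem.Set Int :=
      PySem.Set.ofList ((PySem.List.pyRange 0 cache_len 1).filter
        (fun k => decide (k < prefix_len) && decide (k < filled_end)))
    PySem.Set.union causal_keys prefix_keys
  else causal_keys

-- ===== PORT B =====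
def prefix_chunked_allowed_keys_py_alt (q_pos : Int) (cache_len : Int) (current_step : Int) (chunk_size : Int) (prefix_len : Int) (sliding_window : Int) : List Int :=
  let causal_lo := if sliding_window > 0 then max 0 (q_pos - sliding_window + 1) else 0
  let causal_hi := min (q_pos + 1) cache_len
  let causal_keys : PySem.Set Int := PySem.Set.ofList (PySem.List.pyRange causal_lo causal_hi 1)
  if q_pos < prefix_len then
    let prefix_end := min prefix_len (min (current_step + chunk_size) cache_len)
    PySem.Set.union causal_keys (PySem.Set.ofList (PySem.List.pyRange 0 prefix_end 1))
  else causal_keys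

-- ===== PRECONDITION & SPEC =====
def Spec_prefix_chunked_allowed_keys_py (q_pos : Int) (cache_len : Int) (current_step : Int) (chunk_size : Int) (prefix_len : Int) (sliding_window : Int) (out : List Int) : Prop := out = prefix_chunked_allowed_keys_py_alt q_pos cache_len current_step chunk_size prefix_len sliding_window
instance (q_pos : Int) (cache_len : Int) (current_step : Int) (chunk_size : Int) (prefix_len : Int) (sliding_window : Int) (out : List Int) : Decidable (Spec_prefix_chunked_allowed_keys_py q_pos cache_len current_step chunk_size prefix_len sliding_window out) := by unfold Spec_prefix_chunked_allowed_keys_py; infer_instance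

-- ===== CLAIM (what is proved, stated in full; the proofs are below) =====
def Claim_equal_prefix_chunked_allowed_keys_py : Prop := ∀ (q_pos : Int) (cache_len : Int) (current_step : Int) (chunk_size : Int) (prefix_len : Int) (sliding_window : Int), Dom_prefix_chunked_allowed_keys_py q_pos cache_len current_step chunk_size prefix_len sliding_window → Spec_prefix_chunked_allowed_keys_py q_pos cache_len current_step chunk_size prefix_len sliding_window (prefix_chunked_allowed_keys_py q_pos cache_len current_step chunk_size prefix_len sliding_window)

-- ===== LEMMAS AND PROOFS =====

-- filtering an ascending unit range by an upper bound keeps a prefix interval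
lemma filter_pyRange_le_aux (q : Int) : ∀ (n : Nat) (a b : Int), (b - a).toNat ≤ n →
    (PySem.List.pyRange a b 1).filter (fun k => decide (k ≤ q)) = PySem.List.pyRange a (min b (q+1)) 1 := by
  intro n
  induction n with
  | zero =>
    intro a b h
    rw [PySem.List.pyRange_one_eq_nil (by omega), PySem.List.pyRange_one_eq_nil (by omega)]
    rfl
  | succ n ih =>
    intro a b h
    rcases (by omega : b ≤ a ∨ a < b) with hb | hb
    · rw [PySem.List.pyRange_one_eq_nil hb, PySem.List.pyRange_one_eq_nil (by omega)]; rfl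
    · rw [PySem.List.pyRange_one_cons hb, List.filter_cons, ih (a+1) b (by omega)]
      rcases (by omega : a ≤ q ∨ q < a) with hq | hq
      · simp only [hq, decide_true, if_true]
        rw [PySem.List.pyRange_one_cons (show a < min b (q+1) by omega)]
      · simp only [decide_eq_true_eq]
        rw [if_neg (by omega)]
        rw [PySem.List.pyRange_one_eq_nil (by omega), PySem.List.pyRange_one_eq_nil (by omega)]

lemma filter_pyRange_le (q a b : Int) :
    (PySem.List.pyRange a b 1).filter (fun k => decide (k ≤ q)) = PySem.List.pyRange a (min b (q+1)) 1 :=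
  filter_pyRange_le_aux q (b - a).toNat a b le_rfl

-- filtering an ascending unit range by a strict upper bound
lemma filter_pyRange_lt_aux (m : Int) : ∀ (n : Nat) (a b : Int), (b - a).toNat ≤ n →
    (PySem.List.pyRange a b 1).filter (fun k => decide (k < m)) = PySem.List.pyRange a (min b m) 1 := by
  intro n
  induction n with
  | zero =>
    intro a b h
    rw [PySem.List.pyRange_one_eq_nil (by omega), PySem.List.pyRange_one_eq_nil (by omega)]
    rfl
  | succ n ih =>
    intro a b h
    rcases (by omega : b ≤ a ∨ a < b) with hb | hb
    · rw [PySem.List.pyRange_one_eq_nil hb, PySem.List.pyRange_one_eq_nil (by omega)]; rfl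
    · rw [PySem.List.pyRange_one_cons hb, List.filter_cons, ih (a+1) b (by omega)]
      rcases (by omega : a < m ∨ m ≤ a) with hq | hq
      · simp only [hq, decide_true, if_true]
        rw [PySem.List.pyRange_one_cons (show a < min b m by omega)]
      · simp only [decide_eq_true_eq]
        rw [if_neg (by omega)]
        rw [PySem.List.pyRange_one_eq_nil (by omega), PySem.List.pyRange_one_eq_nil (by omega)]

-- filtering an ascending unit range by a lower bound keeps a suffix interval
lemma filter_pyRange_ge_aux (lo : Int) : ∀ (n : Nat) (a b : Int), (b - a).toNat ≤ n →
    (PySem.List.pyRange a b 1).filter (fun k => decide (lo ≤ k)) = PySem.List.pyRange (max a lo) b 1 := by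
  intro n
  induction n with
  | zero =>
    intro a b h
    rw [PySem.List.pyRange_one_eq_nil (by omega), PySem.List.pyRange_one_eq_nil (by omega)]
    rfl
  | succ n ih =>
    intro a b h
    rcases (by omega : b ≤ a ∨ a < b) with hb | hb
    · rw [PySem.List.pyRange_one_eq_nil hb, PySem.List.pyRange_one_eq_nil (by omega)]; rfl
    · rw [PySem.List.pyRange_one_cons hb, List.filter_cons, ih (a+1) b (by omega)]
      rcases (by omega : lo ≤ a ∨ a < lo) with hq | hq
      · simp only [hq, decide_true, if_true]
        have h1 : max (a+1) lo = a + 1 := by omega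
        have h2 : max a lo = a := by omega
        rw [h1, h2, PySem.List.pyRange_one_cons hb]
      · simp only [decide_eq_true_eq]
        rw [if_neg (by omega)]
        have h1 : max (a+1) lo = max a lo := by omega
        rw [h1]

lemma filter_pyRange_ge (lo a b : Int) :
    (PySem.List.pyRange a b 1).filter (fun k => decide (lo ≤ k)) = PySem.List.pyRange (max a lo) b 1 :=
  filter_pyRange_ge_aux lo (b - a).toNat a b le_rfl

lemma ofList_pyRange (a b : Int) :
    PySem.Set.ofList (PySem.List.pyRange a b 1) = PySem.List.pyRange a b 1 :=
  PySem.Set.ofList_eq_self_of_nodup _ (PySem.List.nodup_pyRange_one a b)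

-- ===== VERDICT (by name: the statement is the Claim_ definition above) =====
theorem prefix_chunked_allowed_keys_py_spec : Claim_equal_prefix_chunked_allowed_keys_py := by
  intro q c s ch pl sw _
  unfold Spec_prefix_chunked_allowed_keys_py
  unfold prefix_chunked_allowed_keys_py prefix_chunked_allowed_keys_py_alt
  have hconj : (fun k : Int => decide (k < pl) && decide (k < s + ch))
      = (fun k : Int => decide (k < min pl (s + ch))) := by
    funext k
    by_cases h : k < pl <;> by_cases h2 : k < s + ch <;>
      simp [h, h2]
  have h1 : min c (q+1) = min (q+1) c := by omega
  have h2 : min c (min pl (s + ch)) = min pl (min (s + ch) c) := by omega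
  simp only [hconj, filter_pyRange_le, filter_pyRange_lt_aux _ _ _ _ le_rfl, filter_pyRange_ge,
    ofList_pyRange, h1, h2]
  split_ifs <;> rfl
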